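-- pv_equiv track=rewrite | github.com/jpvianini/cardinality_count | permutation_count.py | count_permutations_with_inversions
-- ===== SOURCE A (Python) =====
-- def count_permutations_with_inversions(n, k):
--
--     f = [ [0]*(k+1) for _ in range(n+1) ]
--     f[0][0] = 1  # Caso base
--
--
--     for i in range(1, n+1):
--         for s in range(k+1):
--             f[i][s] = 0
--             max_c = min(i-1, s)
--             for c in range(0, max_c+1):
--                 f[i][s] += f[i-1][s - c]
--
--
--     total_permutations = sum(f[n][s] for s in range(k+1))
--     return total_permutations
-- ===== SOURCE B (Python) =====
-- def count_permutations_with_inversions(n, k):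
--     # Sliding-window / prefix-difference DP: one O(k) pass per row instead of
--     # the O(k^2) inner convolution.
--     row = [1] + [0] * k
--     for i in range(1, n + 1):
--         new = [0] * (k + 1)
--         window = 0
--         for s in range(k + 1):
--             window += row[s]
--             if s >= i:
--                 window -= row[s - i]
--             new[s] = window
--         row = new
--     return sum(row)
-- ===== Notes on version B (the rewrite author's own statement) =====
-- stated objective: faster
-- what changed: replaces the innermost convolution loop (sum of up to k+1 previous-row entries per cell, over a full (n+1)x(k+1) table) by a single sliding-window running sum per row, keeping only the previous row
-- outside the precondition, e.g. on count_permutations_with_inversions(-1, 3): A raises IndexError, B returns 1; on count_permutations_with_inversions(2, -1): A raises IndexError, B returns 0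
import Mathlib
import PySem

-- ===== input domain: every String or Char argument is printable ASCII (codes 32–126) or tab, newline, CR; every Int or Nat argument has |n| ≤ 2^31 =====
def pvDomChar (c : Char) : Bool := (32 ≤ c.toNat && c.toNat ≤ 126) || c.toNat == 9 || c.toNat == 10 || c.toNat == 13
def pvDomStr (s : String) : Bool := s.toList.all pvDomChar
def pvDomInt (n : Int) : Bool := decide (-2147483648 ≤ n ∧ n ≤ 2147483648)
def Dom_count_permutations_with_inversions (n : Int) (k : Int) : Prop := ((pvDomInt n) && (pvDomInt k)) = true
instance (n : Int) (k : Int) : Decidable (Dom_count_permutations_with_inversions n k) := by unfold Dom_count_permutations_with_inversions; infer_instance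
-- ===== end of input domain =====

-- B replaces A's innermost convolution loop by a sliding-window running sum over the
-- previous row only (one O(k) pass per row instead of O(k^2)); return values agree on all
-- inputs where A returns (n ≥ 0 and k ≥ 0).

-- ===== PORT A =====
-- A-side helpers: the two inner loops of A, named so the proofs can speak about them.
-- innerA = 'for c in range(0, max_c+1): f[i][s] += f[i-1][s-c]' (prev is the list f[i-1]).
def innerA (prev : List Int) (i s : Int) : Int :=
  (PySem.List.pyRange 0 (min (i - 1) s + 1) 1).foldl
    (fun acc c => acc + PySem.List.pyGetD prev (s - c) 0) 0

-- rowA = 'for s in range(k+1): f[i][s] = ...' updating the row list in place.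
def rowA (prev : List Int) (i k : Int) (init : List Int) : List Int :=
  (PySem.List.pyRange 0 (k + 1) 1).foldl
    (fun row s => PySem.List.pySetD row s (innerA prev i s)) init

def count_permutations_with_inversions (n : Int) (k : Int) : Int :=
  let f0 : List (List Int) :=
    (PySem.List.pyRange 0 (n + 1) 1).map (fun _ => List.replicate (k + 1).toNat (0 : Int))
  let f1 := f0.modify 0 (fun r => r.set 0 1)  -- f[0][0] = 1
  let fN := (PySem.List.pyRange 1 (n + 1) 1).foldl
      (fun f i =>
        PySem.List.pySetD f i
          (rowA (PySem.List.pyGetD f (i - 1) []) i k (PySem.List.pyGetD f i []))) f1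
  ((PySem.List.pyRange 0 (k + 1) 1).map
      (fun s => PySem.List.pyGetD (PySem.List.pyGetD fN n []) s 0)).sum

-- ===== PORT B =====
-- B-side helper: one sliding-window pass producing the next row from the previous one.
def rowB (prev : List Int) (i k : Int) : List Int :=
  ((PySem.List.pyRange 0 (k + 1) 1).foldl
      (fun (st : List Int × Int) s =>
        let w := st.2 + PySem.List.pyGetD prev s 0
        let w := if i ≤ s then w - PySem.List.pyGetD prev (s - i) 0 else w
        (PySem.List.pySetD st.1 s w, w))
      (List.replicate (k + 1).toNat (0 : Int), 0)).1

def count_permutations_with_inversions_alt (n : Int) (k : Int) : Int :=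
  let row0 : List Int := [1] ++ List.replicate k.toNat (0 : Int)
  let rowN := (PySem.List.pyRange 1 (n + 1) 1).foldl (fun row i => rowB row i k) row0
  rowN.sum

-- ===== PRECONDITION & SPEC =====
-- Pre_ excludes exactly the inputs (n < 0 or k < 0) on which the Python A raises
-- IndexError at 'f[0][0] = 1' (the table, or its first row, is empty there).
def Pre_count_permutations_with_inversions (n : Int) (k : Int) : Prop := 0 ≤ n ∧ 0 ≤ k
instance (n : Int) (k : Int) : Decidable (Pre_count_permutations_with_inversions n k) := by
  unfold Pre_count_permutations_with_inversions; infer_instance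

def pvWitness_count_permutations_with_inversions : Int × Int := (3, 2)

def Spec_count_permutations_with_inversions (n : Int) (k : Int) (out : Int) : Prop :=
  out = count_permutations_with_inversions_alt n k
instance (n : Int) (k : Int) (out : Int) : Decidable (Spec_count_permutations_with_inversions n k out) := by
  unfold Spec_count_permutations_with_inversions; infer_instance

-- ===== CLAIM (what is proved, stated in full; the proofs are below) =====
def Claim_equal_count_permutations_with_inversions : Prop :=
  ∀ (n : Int) (k : Int), Dom_count_permutations_with_inversions n k →
    Pre_count_permutations_with_inversions n k →
    Spec_count_permutations_with_inversions n k (count_permutations_with_inversions n k)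

-- ===== LEMMAS AND PROOFS =====

-- prefix sums of a row, and the window value pW prev i s = sum_{t=s+1-i}^{s} prev[t]
def pQ (prev : List Int) (m : Nat) : Int := ((List.range m).map (fun t => prev.getD t 0)).sum
def pW (prev : List Int) (i s : Nat) : Int := pQ prev (s + 1) - pQ prev (s + 1 - i)

def mrow (prev : List Int) (i K : Nat) : List Int := (List.range (K + 1)).map (fun s => pW prev i s)

def mrows (K : Nat) : Nat → List Int
  | 0 => [1] ++ List.replicate K (0 : Int)
  | j + 1 => mrow (mrows K j) (j + 1) K

theorem len_mrows (K j : Nat) : (mrows K j).length = K + 1 := by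
  cases j <;> simp [mrows, mrow]

theorem pQ_succ (prev : List Int) (m : Nat) :
    pQ prev (m + 1) = pQ prev m + prev.getD m 0 := by
  simp [pQ, List.range_succ]

theorem pW_zero (prev : List Int) (i : Nat) (hi : 1 ≤ i) :
    pW prev i 0 = prev.getD 0 0 := by
  unfold pW
  have h1 : 0 + 1 - i = 0 := by omega
  rw [h1, pQ_succ]
  simp [pQ]

theorem pW_succ (prev : List Int) (i s : Nat) (hi : 1 ≤ i) :
    pW prev i (s + 1) =
      pW prev i s + prev.getD (s + 1) 0 -
        (if i ≤ s + 1 then prev.getD (s + 1 - i) 0 else 0) := by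
  unfold pW
  have e1 : pQ prev (s + 1 + 1) = pQ prev (s + 1) + prev.getD (s + 1) 0 := pQ_succ prev (s + 1)
  by_cases h : i ≤ s + 1
  · have h2 : s + 1 + 1 - i = (s + 1 - i) + 1 := by omega
    have e2 : pQ prev ((s + 1 - i) + 1) = pQ prev (s + 1 - i) + prev.getD (s + 1 - i) 0 :=
      pQ_succ prev (s + 1 - i)
    rw [e1, h2, e2, if_pos h]
    ring
  · have h2 : s + 1 + 1 - i = 0 := by omega
    have h3 : s + 1 - i = 0 := by omega
    rw [e1, h2, h3, if_neg h]
    ring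

theorem pSum (prev : List Int) (s m : Nat) (hm : m ≤ s) :
    ((List.range (m + 1)).map (fun c => prev.getD (s - c) 0)).sum
      = pQ prev (s + 1) - pQ prev (s - m) := by
  induction m with
  | zero =>
      show ((List.range 1).map (fun c => prev.getD (s - c) 0)).sum = pQ prev (s + 1) - pQ prev (s - 0)
      have e := pQ_succ prev s
      simp only [List.range_one, List.map_cons, List.map_nil, List.sum_cons, List.sum_nil,
        Nat.sub_zero]
      rw [e]
      ring
  | succ m ih =>
      rw [List.range_succ, List.map_append, List.sum_append, ih (by omega)]
      simp only [List.map_cons, List.map_nil, List.sum_cons, List.sum_nil]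
      have h1 : s - m = (s - (m + 1)) + 1 := by omega
      have e : pQ prev ((s - (m + 1)) + 1) = pQ prev (s - (m + 1)) + prev.getD (s - (m + 1)) 0 :=
        pQ_succ prev (s - (m + 1))
      rw [h1, e]
      ring

theorem pSumW (prev : List Int) (i s : Nat) (hi : 1 ≤ i) :
    ((List.range (min (i - 1) s + 1)).map (fun c => prev.getD (s - c) 0)).sum
      = pW prev i s := by
  rw [pSum prev s (min (i - 1) s) (by omega)]
  unfold pW
  have h : s - min (i - 1) s = s + 1 - i := by omega
  rw [h]

-- value of A's innermost loop
theorem innerA_eq (prev : List Int) (j s : Nat) :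
    innerA prev (1 + (j : Int)) (s : Int) = pW prev (j + 1) s := by
  unfold innerA
  have h1 : (1 + (j : Int)) - 1 = (j : Int) := by ring
  rw [h1]
  have h2 : min (j : Int) (s : Int) = ((min j s : Nat) : Int) := by
    simp [Nat.cast_min]
  rw [h2]
  have h3 : ((min j s : Nat) : Int) + 1 = ((min j s + 1 : Nat) : Int) := by push_cast; ring
  rw [h3, PySem.List.pyRange_zero_nat, List.foldl_map, PySem.List.foldl_add, zero_add]
  have h4 : ∀ c ∈ List.range (min j s + 1),
      PySem.List.pyGetD prev ((s : Int) - (c : Int)) 0 = prev.getD (s - c) 0 := by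
    intro c hc
    rw [List.mem_range] at hc
    have h5 : (s : Int) - (c : Int) = ((s - c : Nat) : Int) := by omega
    rw [h5, PySem.List.pyGetD_natCast]
  rw [List.map_congr_left h4]
  have h6 := pSumW prev (j + 1) s (by omega)
  simpa using h6

-- writing g 0, g 1, …, g (m-1) into the first m slots of init
theorem set_append_len (xs ys : List Int) (v : Int) :
    (xs ++ ys).set xs.length v = xs ++ ys.set 0 v := by
  induction xs with
  | nil => simp
  | cons x xs ih => simp [List.set_cons_succ, ih]

theorem foldl_set_range (g : Nat → Int) (m : Nat) (init : List Int) (h : m ≤ init.length) :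
    (List.range m).foldl (fun row s => row.set s (g s)) init
      = (List.range m).map g ++ init.drop m := by
  induction m with
  | zero => simp
  | succ m ih =>
      rw [List.range_succ, List.foldl_append, ih (by omega)]
      simp only [List.foldl_cons, List.foldl_nil]
      have hlen : ((List.range m).map g).length = m := by simp
      have hset := set_append_len ((List.range m).map g) (init.drop m) (g m)
      rw [hlen] at hset
      rw [hset, List.drop_eq_getElem_cons (show m < init.length by omega), List.set_cons_zero]
      simp

theorem rowA_eq (prev : List Int) (j K : Nat) (init : List Int) (hlen : init.length = K + 1) :
    rowA prev (1 + (j : Int)) (K : Int) init = mrow prev (j + 1) K := by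
  unfold rowA
  have h3 : (K : Int) + 1 = ((K + 1 : Nat) : Int) := by push_cast; ring
  rw [h3, PySem.List.pyRange_zero_nat, List.foldl_map]
  simp only [PySem.List.pySetD_natCast]
  rw [foldl_set_range (fun s => innerA prev (1 + (j : Int)) (s : Int)) (K + 1) init (by omega)]
  rw [List.drop_of_length_le (by omega)]
  unfold mrow
  rw [List.append_nil]
  exact List.map_congr_left (fun s _ => innerA_eq prev j s)

-- B's window step and its iterate
def hB (prev : List Int) (j : Nat) (w : Int) (s : Nat) : Int :=
  if (1 + (j : Int)) ≤ (s : Int) then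
    w + PySem.List.pyGetD prev (s : Int) 0 - PySem.List.pyGetD prev ((s : Int) - (1 + (j : Int))) 0
  else w + PySem.List.pyGetD prev (s : Int) 0

def uF (h : Int → Nat → Int) (t : Nat) : Int := (List.range t).foldl h 0

theorem uF_succ (h : Int → Nat → Int) (t : Nat) : uF h (t + 1) = h (uF h t) t := by
  simp [uF, List.range_succ]

theorem uW (prev : List Int) (j s : Nat) : uF (hB prev j) (s + 1) = pW prev (j + 1) s := by
  induction s with
  | zero =>
      rw [uF_succ]
      have h0 : ¬ ((1 + (j : Int)) ≤ (((0 : Nat)) : Int)) := by omega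
      unfold hB
      rw [if_neg h0, pW_zero prev (j + 1) (by omega)]
      show (0 : Int) + PySem.List.pyGetD prev ((0 : Nat) : Int) 0 = prev.getD 0 0
      rw [PySem.List.pyGetD_natCast, zero_add]
  | succ s ih =>
      rw [uF_succ, ih, pW_succ prev (j + 1) s (by omega)]
      unfold hB
      by_cases h : j + 1 ≤ s + 1
      · have hc : (1 + (j : Int)) ≤ ((s + 1 : Nat) : Int) := by push_cast; omega
        have hidx : ((s + 1 : Nat) : Int) - (1 + (j : Int)) = ((s + 1 - (j + 1) : Nat) : Int) := by
          push_cast; omega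
        rw [if_pos hc, if_pos h, hidx]
        simp only [PySem.List.pyGetD_natCast]
      · have hc : ¬ ((1 + (j : Int)) ≤ ((s + 1 : Nat) : Int)) := by push_cast; omega
        rw [if_neg hc, if_neg h]
        simp only [PySem.List.pyGetD_natCast]
        ring

theorem foldl_pairset_range (h : Int → Nat → Int) (m : Nat) (init : List Int)
    (hm : m ≤ init.length) :
    (List.range m).foldl (fun (st : List Int × Int) s => (st.1.set s (h st.2 s), h st.2 s)) (init, 0)
      = ((List.range m).map (fun s => uF h (s + 1)) ++ init.drop m, uF h m) := by
  induction m with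
  | zero => simp [uF]
  | succ m ih =>
      rw [List.range_succ, List.foldl_append, ih (by omega)]
      simp only [List.foldl_cons, List.foldl_nil]
      have hlen : ((List.range m).map (fun s => uF h (s + 1))).length = m := by simp
      have hset := set_append_len ((List.range m).map (fun s => uF h (s + 1))) (init.drop m)
        (h (uF h m) m)
      rw [hlen] at hset
      rw [hset, List.drop_eq_getElem_cons (show m < init.length by omega), List.set_cons_zero,
        ← uF_succ h m]
      simp

theorem rowB_eq (prev : List Int) (j K : Nat) :
    rowB prev (1 + (j : Int)) (K : Int) = mrow prev (j + 1) K := by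
  unfold rowB
  have h3 : (K : Int) + 1 = ((K + 1 : Nat) : Int) := by push_cast; ring
  have h4 : ((K : Int) + 1).toNat = K + 1 := by omega
  rw [h4, h3, PySem.List.pyRange_zero_nat, List.foldl_map]
  have hbody : (fun (st : List Int × Int) (s : Nat) =>
        let w := st.2 + PySem.List.pyGetD prev ((s : Nat) : Int) 0
        let w := if (1 + (j : Int)) ≤ ((s : Nat) : Int) then
            w - PySem.List.pyGetD prev (((s : Nat) : Int) - (1 + (j : Int))) 0 else w
        (PySem.List.pySetD st.1 ((s : Nat) : Int) w, w))
      = (fun (st : List Int × Int) (s : Nat) => (st.1.set s (hB prev j st.2 s), hB prev j st.2 s)) := by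
    funext st s
    by_cases hc : (1 + (j : Int)) ≤ ((s : Nat) : Int) <;>
      simp [hB, hc, PySem.List.pySetD_natCast]
  rw [hbody, foldl_pairset_range (hB prev j) (K + 1) (List.replicate (K + 1) 0) (by simp)]
  simp only [List.drop_replicate, Nat.sub_self, List.replicate_zero, List.append_nil]
  unfold mrow
  exact List.map_congr_left (fun s _ => uW prev j s)

-- the table A maintains, after the rows 1..j have been filled in
def fA (K N j : Nat) : List (List Int) :=
  (List.range (N + 1)).map (fun t => if t ≤ j then mrows K t else List.replicate (K + 1) (0 : Int))

theorem len_fA (K N j : Nat) : (fA K N j).length = N + 1 := by simp [fA]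

theorem fA_getD (K N j t : Nat) (ht : t ≤ N) :
    (fA K N j).getD t [] = if t ≤ j then mrows K t else List.replicate (K + 1) (0 : Int) := by
  have hlt : t < (fA K N j).length := by rw [len_fA]; omega
  rw [List.getD_eq_getElem _ _ hlt]
  simp [fA]

theorem fA_set (K N m : Nat) (hm : m + 1 ≤ N) :
    (fA K N m).set (m + 1) (mrows K (m + 1)) = fA K N (m + 1) := by
  apply List.ext_getElem
  · simp [fA]
  · intro t ht1 ht2
    rw [List.getElem_set]
    simp only [fA, List.getElem_map, List.getElem_range]
    by_cases h1 : m + 1 = t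
    · subst h1; simp
    · rw [if_neg h1]
      by_cases h2 : t ≤ m
      · rw [if_pos h2, if_pos (by omega)]
      · rw [if_neg h2, if_neg (by omega)]

theorem A_outer (K N m : Nat) (hm : m ≤ N) :
    (List.range m).foldl
      (fun (f : List (List Int)) (j : Nat) =>
        PySem.List.pySetD f (1 + (j : Int))
          (rowA (PySem.List.pyGetD f (1 + (j : Int) - 1) []) (1 + (j : Int)) (K : Int)
            (PySem.List.pyGetD f (1 + (j : Int)) []))) (fA K N 0)
      = fA K N m := by
  induction m with
  | zero => simp
  | succ m ih =>
      rw [List.range_succ, List.foldl_append, ih (by omega)]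
      simp only [List.foldl_cons, List.foldl_nil]
      have e1 : (1 + (m : Int) - 1) = ((m : Nat) : Int) := by ring
      have e2 : (1 + (m : Int)) = ((m + 1 : Nat) : Int) := by push_cast; ring
      rw [e1, e2, PySem.List.pyGetD_natCast, PySem.List.pyGetD_natCast,
        PySem.List.pySetD_natCast]
      rw [fA_getD K N m m (by omega), if_pos (le_refl m)]
      rw [fA_getD K N m (m + 1) (by omega), if_neg (by omega)]
      have hr := rowA_eq (mrows K m) m K (List.replicate (K + 1) 0) (by simp)
      rw [e2] at hr
      rw [hr]
      rw [show mrow (mrows K m) (m + 1) K = mrows K (m + 1) from rfl,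
        fA_set K N m (by omega)]

theorem B_outer (K N m : Nat) (hm : m ≤ N) :
    (List.range m).foldl (fun (row : List Int) (j : Nat) => rowB row (1 + (j : Int)) (K : Int))
      (mrows K 0) = mrows K m := by
  induction m with
  | zero => simp
  | succ m ih =>
      rw [List.range_succ, List.foldl_append, ih (by omega)]
      simp only [List.foldl_cons, List.foldl_nil]
      rw [rowB_eq (mrows K m) m K]
      rfl

theorem map_getD_range (R : List Int) (n : Nat) (h : R.length = n) :
    (List.range n).map (fun s => R.getD s 0) = R := by
  apply List.ext_getElem
  · simp [h]
  · intro t ht1 ht2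
    simp only [List.getElem_map, List.getElem_range]
    rw [List.getD_eq_getElem _ _ (by omega)]

theorem base_fA (K N : Nat) :
    ((PySem.List.pyRange 0 ((N : Int) + 1) 1).map
        (fun _ => List.replicate (((K : Int) + 1)).toNat (0 : Int))).modify 0 (fun r => r.set 0 1)
      = fA K N 0 := by
  have h1 : ((K : Int) + 1).toNat = K + 1 := by omega
  have h2 : ((N : Int) + 1) = ((N + 1 : Nat) : Int) := by push_cast; ring
  rw [h1, h2, PySem.List.pyRange_zero_nat, List.map_map]
  apply List.ext_getElem
  · simp [fA]
  · intro t ht1 ht2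
    rw [List.getElem_modify]
    simp only [List.getElem_map, List.getElem_range, Function.comp_apply, fA]
    by_cases h : 0 = t
    · subst h
      rw [if_pos rfl, if_pos (le_refl 0)]
      show (List.replicate (K + 1) (0 : Int)).set 0 1 = mrows K 0
      rw [List.replicate_succ]
      simp [mrows]
    · rw [if_neg h, if_neg (by omega)]

theorem final_map (R : List Int) (K : Nat) (h : R.length = K + 1) :
    ((PySem.List.pyRange 0 ((K : Int) + 1) 1).map (fun s => PySem.List.pyGetD R s 0)).sum
      = R.sum := by
  rw [show (K : Int) + 1 = ((K + 1 : Nat) : Int) by push_cast; ring,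
    PySem.List.pyRange_zero_nat, List.map_map]
  have hc : ∀ s ∈ List.range (K + 1),
      ((fun s => PySem.List.pyGetD R s 0) ∘ (fun (k : Nat) => (k : Int))) s = R.getD s 0 := by
    intro s _
    simp [Function.comp, PySem.List.pyGetD_natCast]
  rw [List.map_congr_left hc, map_getD_range R (K + 1) h]

-- the two ports agree on casts of naturals
theorem key_eq (N K : Nat) :
    count_permutations_with_inversions (N : Int) (K : Int)
      = count_permutations_with_inversions_alt (N : Int) (K : Int) := by
  unfold count_permutations_with_inversions count_permutations_with_inversions_alt
  have hrange1 : PySem.List.pyRange 1 ((N : Int) + 1) 1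
      = (List.range N).map (fun (j : Nat) => 1 + (j : Int)) := by
    rw [PySem.List.pyRange_one]
    rw [show ((N : Int) + 1 - 1).toNat = N by omega]
  have hk0 : ((K : Int)).toNat = K := by omega
  simp only [hrange1, List.foldl_map, hk0]
  rw [base_fA K N, A_outer K N N (le_refl N)]
  rw [show PySem.List.pyGetD (fA K N N) (N : Int) [] = mrows K N by
    rw [PySem.List.pyGetD_natCast, fA_getD K N N N (le_refl N), if_pos (le_refl N)]]
  rw [final_map (mrows K N) K (len_mrows K N)]
  rw [show ([1] ++ List.replicate K (0 : Int)) = mrows K 0 from rfl,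
    B_outer K N N (le_refl N)]

-- ===== VERDICT (by name: the statement is the Claim_ definition above) =====
theorem count_permutations_with_inversions_spec : Claim_equal_count_permutations_with_inversions := by
  intro n k _hdom hpre
  obtain ⟨hn, hk⟩ := hpre
  unfold Spec_count_permutations_with_inversions
  have h := key_eq n.toNat k.toNat
  rwa [Int.toNat_of_nonneg hn, Int.toNat_of_nonneg hk] at h
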